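-- pv_equiv track=rewrite | github.com/nomzi3/AdventOfCode2021 | 12/02.py | check_reachedMaxSmallCaveEntrancesInRun
-- ===== SOURCE A (Python) =====
-- from collections import Counter
--
-- def check_reachedMaxSmallCaveEntrancesInRun(listToCheck):
--     counted_items = Counter(listToCheck)
--     small_cave_dup_counter = 0
--     for item in listToCheck:
--         if item.islower():
--             if counted_items[item] > 1:
--                 small_cave_dup_counter += 1
--     ##this is a really stupid check, but in short
--     ##due to above for item-loop, we count the last item in the list twice
--     ###so we're interested if the dup-check returns more than 2, meaning 1 other item is a duplicate
--     if small_cave_dup_counter > 2: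
--         return True
--     else:
--         return False
-- ===== SOURCE B (Python) =====
-- def check_reachedMaxSmallCaveEntrancesInRun(listToCheck):
--     s = sorted(listToCheck)
--     total = 0
--     run = 0
--     prev = None
--     for item in s:
--         if item == prev:
--             run += 1
--         else:
--             if run > 1 and prev.islower():
--                 total += run
--             run = 1
--             prev = item
--     if run > 1 and prev.islower():
--         total += run
--     return total > 2
-- ===== Notes on version B (the rewrite author's own statement) =====
-- stated objective: alternative
-- what changed: B drops the Counter entirely: it sorts the list and scans it once, detecting runs of equal adjacent items and adding the run length for each duplicated lowercase run, instead of A's hash-count pass with a Counter lookup per element.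
import Mathlib
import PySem

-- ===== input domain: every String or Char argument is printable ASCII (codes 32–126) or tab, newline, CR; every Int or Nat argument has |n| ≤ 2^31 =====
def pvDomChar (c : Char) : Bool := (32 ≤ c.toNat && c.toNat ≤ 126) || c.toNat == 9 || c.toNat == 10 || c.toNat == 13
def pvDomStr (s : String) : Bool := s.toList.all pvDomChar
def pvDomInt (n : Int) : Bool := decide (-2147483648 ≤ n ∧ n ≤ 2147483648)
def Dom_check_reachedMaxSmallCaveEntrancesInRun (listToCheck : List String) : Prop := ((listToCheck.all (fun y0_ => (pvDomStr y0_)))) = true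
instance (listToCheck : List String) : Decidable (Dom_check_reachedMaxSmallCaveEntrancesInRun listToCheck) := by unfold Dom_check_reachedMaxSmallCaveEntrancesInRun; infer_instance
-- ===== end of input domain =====

-- B drops the Counter entirely: it sorts the list and scans it once, summing the lengths of the
-- duplicated lowercase runs of equal adjacent items (objective: alternative algorithm, same result).

-- str.islower(): at least one cased character and no uppercase one.
-- Exact on the ASCII input domain, where the cased characters are exactly a-z and A-Z.
def pyStrIslower (s : String) : Bool :=
  s.toList.any PySem.Chars.islower && s.toList.all (fun c => !PySem.Chars.isupper c)

-- ===== PORT A =====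
def check_reachedMaxSmallCaveEntrancesInRun (listToCheck : List String) : Bool :=
  let counted_items := PySem.Dict.counter listToCheck
  let small_cave_dup_counter : Int :=
    listToCheck.foldl (fun acc item =>
      if pyStrIslower item then
        if counted_items.getD item 0 > 1 then acc + 1 else acc
      else acc) 0
  if small_cave_dup_counter > 2 then true else false

-- ===== PORT B =====
-- prev.islower() guarded by run > 1 (so prev is never None when it is read)
def pvPrevIslower : Option String → Bool
  | some p => pyStrIslower p
  | none => false

-- one step of B's scan over the sorted list; state = (total, run, prev)
def pvStep (st : Int × Int × Option String) (item : String) : Int × Int × Option String :=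
  if some item == st.2.2 then (st.1, st.2.1 + 1, st.2.2)
  else ((if st.2.1 > 1 && pvPrevIslower st.2.2 then st.1 + st.2.1 else st.1), 1, some item)

def check_reachedMaxSmallCaveEntrancesInRun_alt (listToCheck : List String) : Bool :=
  let s := PySem.List.sorted listToCheck (fun x => x) false
  let st := s.foldl pvStep (0, 0, none)
  let total := if st.2.1 > 1 && pvPrevIslower st.2.2 then st.1 + st.2.1 else st.1
  total > 2

-- ===== PRECONDITION & SPEC =====
def Spec_check_reachedMaxSmallCaveEntrancesInRun (listToCheck : List String) (out : Bool) : Prop := out = check_reachedMaxSmallCaveEntrancesInRun_alt listToCheck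
instance (listToCheck : List String) (out : Bool) : Decidable (Spec_check_reachedMaxSmallCaveEntrancesInRun listToCheck out) := by unfold Spec_check_reachedMaxSmallCaveEntrancesInRun; infer_instance

-- ===== CLAIM (what is proved, stated in full; the proofs are below) =====
def Claim_equal_check_reachedMaxSmallCaveEntrancesInRun : Prop := ∀ (listToCheck : List String), Dom_check_reachedMaxSmallCaveEntrancesInRun listToCheck → Spec_check_reachedMaxSmallCaveEntrancesInRun listToCheck (check_reachedMaxSmallCaveEntrancesInRun listToCheck)

-- ===== LEMMAS AND PROOFS =====

-- the per-occurrence predicate of A, parametrised by the list the counts are taken in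
def pvP (xs : List String) (x : String) : Bool :=
  pyStrIslower x && decide ((xs.count x : Int) > 1)

-- B's scan result from a given state
def pvT (t r : Int) (p : Option String) (l : List String) : Int :=
  let st := l.foldl pvStep (t, r, p)
  if st.2.1 > 1 && pvPrevIslower st.2.2 then st.1 + st.2.1 else st.1

-- A's loop is the per-occurrence count
theorem pv_foldA (xs : List String) : ∀ (l : List String) (init : Int),
    l.foldl (fun acc item =>
      if pyStrIslower item then
        if (PySem.Dict.counter xs).getD item 0 > 1 then acc + 1 else acc
      else acc) init
    = init + (l.countP (pvP xs) : Int) := by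
  intro l
  induction l with
  | nil => simp
  | cons a l ih =>
    intro init
    simp only [List.foldl_cons]
    split_ifs with h1 h2
    · rw [ih, List.countP_cons]
      rw [PySem.Dict.getD_counter] at h2
      simp [pvP, h1, h2]
      ring
    · rw [ih, List.countP_cons]
      rw [PySem.Dict.getD_counter] at h2
      simp [pvP, h1, h2]
    · rw [ih, List.countP_cons]
      simp [pvP, h1]

-- the accumulated total is an additive offset of the scan
theorem pvT_add : ∀ (l : List String) (t r : Int) (p : Option String),
    pvT t r p l = t + pvT 0 r p l := by
  intro l
  induction l with
  | nil =>
    intro t r p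
    by_cases h : (decide (r > 1) && pvPrevIslower p) = true <;>
      simp [pvT, List.foldl_nil, h]
  | cons x l ih =>
    intro t r p
    by_cases h : (some x == p) = true
    · have e1 : pvT t r p (x :: l) = pvT t (r + 1) p l := by
        simp [pvT, pvStep, h]
      have e2 : pvT 0 r p (x :: l) = pvT 0 (r + 1) p l := by
        simp [pvT, pvStep, h]
      rw [e1, e2, ih]
    · have e1 : pvT t r p (x :: l)
          = pvT (if r > 1 && pvPrevIslower p then t + r else t) 1 (some x) l := by
        simp [pvT, pvStep, h]
      have e2 : pvT 0 r p (x :: l)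
          = pvT (if r > 1 && pvPrevIslower p then 0 + r else 0) 1 (some x) l := by
        simp [pvT, pvStep, h]
      rw [e1, e2, ih, ih (if r > 1 && pvPrevIslower p then 0 + r else 0)]
      split_ifs <;> ring

-- scanning a block of copies of the current item only extends the run
theorem pvT_run : ∀ (k : List String) (x : String) (r : Int) (l : List String),
    (∀ y ∈ k, y = x) →
    pvT 0 r (some x) (k ++ l) = pvT 0 (r + k.length) (some x) l := by
  intro k
  induction k with
  | nil => intro x r l _; simp
  | cons y k ih =>
    intro x r l hk
    have hy : y = x := hk y (List.mem_cons_self)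
    subst hy
    have e1 : pvT 0 r (some y) ((y :: k) ++ l) = pvT 0 (r + 1) (some y) (k ++ l) := by
      simp [pvT, pvStep]
    rw [e1, ih y (r + 1) l (fun z hz => hk z (List.mem_cons_of_mem _ hz))]
    have : r + 1 + (k.length : Int) = r + ((k.length : Int) + 1) := by ring
    simp [this]

-- countP over a list all of whose elements are x
theorem pv_countP_const (p : String → Bool) (x : String) :
    ∀ (l : List String), (∀ y ∈ l, y = x) →
    l.countP p = if p x then l.length else 0 := by
  intro l
  induction l with
  | nil => intro _; simp
  | cons y l ih =>
    intro h
    have hy : y = x := h y (List.mem_cons_self)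
    subst hy
    rw [List.countP_cons, ih (fun z hz => h z (List.mem_cons_of_mem _ hz))]
    by_cases hp : p y <;> simp [hp]

-- count of z in a list all of whose elements are x ≠ z
theorem pv_count_zero (x z : String) (hzx : z ≠ x) :
    ∀ (l : List String), (∀ y ∈ l, y = x) → l.count z = 0 := by
  intro l
  induction l with
  | nil => intro _; simp
  | cons y l ih =>
    intro h
    have hy : y = x := h y (List.mem_cons_self)
    subst hy
    rw [List.count_cons, ih (fun z hz => h z (List.mem_cons_of_mem _ hz))]
    simp [Ne.symm hzx]

-- the main invariant: on a sorted list the scan computes the per-occurrence count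
theorem pv_main : ∀ (n : Nat) (s : List String), s.length ≤ n → s.Pairwise (· ≤ ·) →
    pvT 0 0 none s = (s.countP (pvP s) : Int) := by
  intro n
  induction n with
  | zero =>
    intro s hl _
    have : s = [] := List.eq_nil_of_length_eq_zero (Nat.le_zero.mp hl)
    subst this; simp [pvT, pvPrevIslower]
  | succ n ih =>
    intro s hl hs
    match s with
    | [] => simp [pvT, pvPrevIslower]
    | x :: rest =>
      have hstep1 : pvT 0 0 none (x :: rest) = pvT 0 1 (some x) rest := by
        simp [pvT, pvStep, pvPrevIslower]
      have hsplit : rest = rest.takeWhile (· == x) ++ rest.dropWhile (· == x) :=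
        (List.takeWhile_append_dropWhile).symm
      generalize hkk : rest.takeWhile (· == x) = k at hsplit
      generalize hrr : rest.dropWhile (· == x) = rest' at hsplit
      have hkx : ∀ y ∈ k, y = x := by
        intro y hy
        have := List.mem_takeWhile_imp (hkk ▸ hy)
        simpa using this
      have hrun : pvT 0 1 (some x) rest = pvT 0 (1 + k.length) (some x) rest' := by
        rw [hsplit]; exact pvT_run k x 1 rest' hkx
      have hxle : ∀ z ∈ rest, x ≤ z := (List.pairwise_cons.mp hs).1
      have hrest_pw : rest.Pairwise (· ≤ ·) := (List.pairwise_cons.mp hs).2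
      have hrest'_sub : rest'.Sublist rest := hrr ▸ List.dropWhile_sublist (· == x)
      have hrest'_pw : rest'.Pairwise (· ≤ ·) := hrest_pw.sublist hrest'_sub
      have hne : ∀ z ∈ rest', z ≠ x := by
        intro z hz hzx
        obtain ⟨y, ys, hys⟩ : ∃ y ys, rest' = y :: ys := by
          cases rest' with
          | nil => simp at hz
          | cons a b => exact ⟨a, b, rfl⟩
        have hhd := List.head?_dropWhile_not (· == x) rest
        rw [hrr, hys] at hhd
        have hyx : y ≠ x := by simpa using hhd
        rw [hys] at hz
        rcases List.mem_cons.mp hz with h | h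
        · exact hyx (by rw [← h]; exact hzx)
        · have h1 : y ≤ z := (List.pairwise_cons.mp (by rw [← hys]; exact hrest'_pw)).1 z h
          have h2 : x ≤ y := hxle y (hrest'_sub.mem (by rw [hys]; exact List.mem_cons_self))
          exact hyx (le_antisymm (by rw [← hzx]; exact h1) h2)
      have hcx0 : rest'.count x = 0 := by
        by_contra hc
        exact hne x (List.count_pos_iff.mp (Nat.pos_of_ne_zero hc)) rfl
      have hcount_x : (x :: rest).count x = 1 + k.length := by
        rw [hsplit, ← List.cons_append, List.count_append, hcx0,
            List.count_eq_length.mpr (by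
              intro y hy
              rcases List.mem_cons.mp hy with h | h
              · exact h.symm ▸ rfl
              · exact (hkx y h).symm)]
        simp; omega
      -- counts of rest'-elements are unaffected by the x-block
      have hcz : ∀ z ∈ rest', (x :: rest).count z = rest'.count z := by
        intro z hz
        rw [hsplit, ← List.cons_append, List.count_append,
            pv_count_zero x z (hne z hz) (x :: k) (by
              intro y hy
              rcases List.mem_cons.mp hy with h | h
              · exact h
              · exact hkx y h)]
        omega
      -- split the RHS count
      have hcountP : ((x :: rest).countP (pvP (x :: rest)) : Int)
          = (if pvP (x :: rest) x then ((1 : Int) + k.length) else 0)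
            + (rest'.countP (pvP rest') : Int) := by
        have h1 : (x :: rest).countP (pvP (x :: rest))
            = (x :: k).countP (pvP (x :: rest)) + rest'.countP (pvP (x :: rest)) := by
          rw [hsplit, ← List.cons_append, List.countP_append]
        have h2 : (x :: k).countP (pvP (x :: rest))
            = if pvP (x :: rest) x then (x :: k).length else 0 :=
          pv_countP_const _ x (x :: k) (by
            intro y hy
            rcases List.mem_cons.mp hy with h | h
            · exact h
            · exact hkx y h)
        have h3 : rest'.countP (pvP (x :: rest)) = rest'.countP (pvP rest') :=
          List.countP_congr (by
            intro z hz
            simp only [pvP, hcz z hz])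
        rw [h1, h2, h3]
        push_cast
        by_cases hp : pvP (x :: rest) x <;> simp [hp] <;> omega
      -- the scan side
      rw [hstep1, hrun, hcountP]
      cases hrc : rest' with
      | nil =>
        have hLHS : pvT 0 (1 + (k.length : Int)) (some x) []
            = if (1 + (k.length : Int)) > 1 && pyStrIslower x
              then 1 + (k.length : Int) else 0 := by
          simp [pvT, pvPrevIslower]
        rw [hLHS]
        simp only [List.countP_nil, Nat.cast_zero, add_zero, pvP, hcount_x]
        push_cast
        by_cases hlow : pyStrIslower x = true <;> simp [hlow]
      | cons y ys =>
        have hyx : y ≠ x := hne y (by rw [hrc]; exact List.mem_cons_self)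
        have hT : pvT 0 (1 + (k.length : Int)) (some x) (y :: ys)
            = (if (1 + (k.length : Int)) > 1 && pyStrIslower x
               then 1 + (k.length : Int) else 0)
              + pvT 0 0 none (y :: ys) := by
          have e1 : pvT 0 (1 + (k.length : Int)) (some x) (y :: ys)
              = pvT (if (1 + (k.length : Int)) > 1 && pvPrevIslower (some x)
                     then 0 + (1 + (k.length : Int)) else 0) 1 (some y) ys := by
            simp [pvT, pvStep, hyx]
          have e2 : pvT 0 0 none (y :: ys) = pvT 0 1 (some y) ys := by
            simp [pvT, pvStep, pvPrevIslower]
          rw [e1, pvT_add, e2, pvPrevIslower]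
          split_ifs <;> ring
        have hlen : (y :: ys).length ≤ n := by
          have h1 : rest'.length ≤ rest.length := hrest'_sub.length_le
          rw [hrc] at h1
          simp only [List.length_cons] at hl h1 ⊢
          omega
        have hIH : pvT 0 0 none (y :: ys) = ((y :: ys).countP (pvP (y :: ys)) : Int) :=
          ih (y :: ys) hlen (by rw [← hrc]; exact hrest'_pw)
        rw [hT, hIH]
        simp only [pvP, hcount_x]
        push_cast
        by_cases hlow : pyStrIslower x = true <;> simp [hlow]


-- ===== VERDICT (by name: the statement is the Claim_ definition above) =====
theorem check_reachedMaxSmallCaveEntrancesInRun_spec : Claim_equal_check_reachedMaxSmallCaveEntrancesInRun := by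
  intro xs _
  unfold Spec_check_reachedMaxSmallCaveEntrancesInRun
  unfold check_reachedMaxSmallCaveEntrancesInRun check_reachedMaxSmallCaveEntrancesInRun_alt
  simp only [pv_foldA, zero_add]
  have hperm : (PySem.List.sorted xs (fun x => x) false).Perm xs :=
    PySem.List.sorted_perm xs (fun x => x) false
  have hpw : (PySem.List.sorted xs (fun x => x) false).Pairwise (· ≤ ·) :=
    PySem.List.sorted_pairwise xs (fun x => x)
  have hmain := pv_main (PySem.List.sorted xs (fun x => x) false).length
    (PySem.List.sorted xs (fun x => x) false) le_rfl hpw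
  have hcongr : (PySem.List.sorted xs (fun x => x) false).countP
        (pvP (PySem.List.sorted xs (fun x => x) false))
      = (PySem.List.sorted xs (fun x => x) false).countP (pvP xs) :=
    List.countP_congr (by
      intro z _
      simp only [pvP, hperm.count_eq])
  have hcp : (PySem.List.sorted xs (fun x => x) false).countP (pvP xs)
      = xs.countP (pvP xs) := hperm.countP_eq _
  have hB : pvT 0 0 none (PySem.List.sorted xs (fun x => x) false)
      = (xs.countP (pvP xs) : Int) := by
    rw [hmain, hcongr, hcp]
  simp only [pvT] at hB
  rw [hB]
  by_cases h : ((xs.countP (pvP xs) : Int) > 2) <;> simp [h]
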